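-- pv_equiv track=rewrite | github.com/SteveRuben/urban-board | backend/app/services/exercise_generator.py | _identify_main_technology
-- ===== SOURCE A (Python) =====
-- from typing import Dict, Any, List, Optional
--
-- def _identify_main_technology(skills: List[str]) -> Optional[str]:
--     """Identifie la technologie principale parmi les compétences."""
--     # Mapping des compétences vers les technologies
--     technology_mappings = {
--         "flutter": "Flutter",
--         "dart": "Dart",
--         "react": "React",
--         "angular": "Angular",
--         "vue": "Vue.js",
--         "node.js": "Node.js",
--         "nodejs": "Node.js",
--         "python": "Python",
--         "django": "Django",
--         "flask": "Flask",
--         "java": "Java",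
--         "spring": "Spring",
--         "javascript": "JavaScript",
--         "typescript": "TypeScript",
--         "php": "PHP",
--         "laravel": "Laravel",
--         "ruby": "Ruby",
--         "c#": "C#",
--         "csharp": "C#",
--         ".net": ".NET",
--         "dotnet": ".NET"
--     }
--
--     # Rechercher parmi les compétences
--     for skill in skills:
--         skill_lower = skill.lower()
--         if skill_lower in technology_mappings:
--             return technology_mappings[skill_lower]
--
--     # Si aucune technologie n'est identifiée mais "frontend" ou "backend" est mentionné
--     for skill in skills:
--         skill_lower = skill.lower()
--         if "frontend" in skill_lower:
--             return "JavaScript"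
--         elif "backend" in skill_lower:
--             return "Python"
--
--     # Retour par défaut
--     return "Python"  # Langue par défaut
-- ===== SOURCE B (Python) =====
-- from typing import List, Optional
--
-- _TECH = {
--     "flutter": "Flutter", "dart": "Dart", "react": "React", "angular": "Angular",
--     "vue": "Vue.js", "node.js": "Node.js", "nodejs": "Node.js", "python": "Python",
--     "django": "Django", "flask": "Flask", "java": "Java", "spring": "Spring",
--     "javascript": "JavaScript", "typescript": "TypeScript", "php": "PHP",
--     "laravel": "Laravel", "ruby": "Ruby", "c#": "C#", "csharp": "C#",
--     ".net": ".NET", "dotnet": ".NET",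
-- }
--
-- def _identify_main_technology(skills: List[str]) -> Optional[str]:
--     """Single pass: exact dict hit returns immediately; frontend/backend hint kept as a deferred fallback."""
--     fallback = None
--     for skill in skills:
--         skill_lower = skill.lower()
--         hit = _TECH.get(skill_lower)
--         if hit is not None:
--             return hit
--         if fallback is None:
--             if "frontend" in skill_lower:
--                 fallback = "JavaScript"
--             elif "backend" in skill_lower:
--                 fallback = "Python"
--     return fallback if fallback is not None else "Python"
-- ===== Notes on version B (the rewrite author's own statement) =====
-- stated objective: simpler
-- what changed: Replaces A's two sequential scans over skills with one pass that returns on an exact dict hit and maintains a deferred frontend/backend fallback accumulator, returned (or defaulted to 'Python') after the loop.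
import Mathlib
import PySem

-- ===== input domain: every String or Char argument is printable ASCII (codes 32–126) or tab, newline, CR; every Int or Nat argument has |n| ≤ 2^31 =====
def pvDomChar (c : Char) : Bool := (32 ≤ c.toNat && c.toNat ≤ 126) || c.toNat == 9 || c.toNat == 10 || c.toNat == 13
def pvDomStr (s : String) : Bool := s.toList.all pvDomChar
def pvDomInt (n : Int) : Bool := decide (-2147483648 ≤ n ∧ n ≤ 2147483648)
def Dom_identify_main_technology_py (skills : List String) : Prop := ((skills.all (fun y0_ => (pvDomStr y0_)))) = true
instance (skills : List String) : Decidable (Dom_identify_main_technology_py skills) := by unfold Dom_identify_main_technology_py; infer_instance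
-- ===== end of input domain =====

-- B replaces A's two sequential scans with one pass keeping a deferred frontend/backend fallback; objective: simpler.

-- ===== PORT A =====
def techMap : PySem.Dict String String := PySem.Dict.ofList
  [("flutter", "Flutter"), ("dart", "Dart"), ("react", "React"), ("angular", "Angular"),
   ("vue", "Vue.js"), ("node.js", "Node.js"), ("nodejs", "Node.js"), ("python", "Python"),
   ("django", "Django"), ("flask", "Flask"), ("java", "Java"), ("spring", "Spring"),
   ("javascript", "JavaScript"), ("typescript", "TypeScript"), ("php", "PHP"),
   ("laravel", "Laravel"), ("ruby", "Ruby"), ("c#", "C#"), ("csharp", "C#"),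
   (".net", ".NET"), ("dotnet", ".NET")]

-- first loop of A: first exact (lower-cased) dict hit
def pyLoop1 : List String → Option String
  | [] => none
  | s :: rest =>
    let sl := PySem.Str.lower s
    match techMap.get? sl with
    | some v => some v
    | none => pyLoop1 rest

-- second loop of A: frontend/backend substring hint, default "Python"
def pyLoop2 : List String → String
  | [] => "Python"
  | s :: rest =>
    let sl := PySem.Str.lower s
    if PySem.Str.isIn "frontend" sl then "JavaScript"
    else if PySem.Str.isIn "backend" sl then "Python"
    else pyLoop2 rest

def identify_main_technology_py (skills : List String) : Option String :=
  match pyLoop1 skills with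
  | some v => some v
  | none => some (pyLoop2 skills)

-- ===== PORT B =====
-- single pass with a deferred fallback accumulator (Source B's loop)
def altGo : List String → Option String → Option String
  | [], fb => some (fb.getD "Python")
  | s :: rest, fb =>
    let sl := PySem.Str.lower s
    match techMap.get? sl with
    | some v => some v
    | none =>
      altGo rest
        (if fb.isNone then
          (if PySem.Str.isIn "frontend" sl then some "JavaScript"
           else if PySem.Str.isIn "backend" sl then some "Python"
           else none)
         else fb)

def identify_main_technology_py_alt (skills : List String) : Option String :=
  altGo skills none

-- ===== PRECONDITION & SPEC =====
def Spec_identify_main_technology_py (skills : List String) (out : Option String) : Prop := out = identify_main_technology_py_alt skills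
instance (skills : List String) (out : Option String) : Decidable (Spec_identify_main_technology_py skills out) := by unfold Spec_identify_main_technology_py; infer_instance

-- ===== CLAIM (what is proved, stated in full; the proofs are below) =====
def Claim_equal_identify_main_technology_py : Prop := ∀ (skills : List String), Dom_identify_main_technology_py skills → Spec_identify_main_technology_py skills (identify_main_technology_py skills)

-- ===== LEMMAS AND PROOFS =====
-- invariant of B's loop: the accumulator fb stands for the already-found frontend/backend hint
theorem altGo_eq (skills : List String) : ∀ fb : Option String,
    altGo skills fb =
      match pyLoop1 skills with
      | some v => some v
      | none => some (match fb with | some f => f | none => pyLoop2 skills) := by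
  induction skills with
  | nil => intro fb; cases fb <;> simp [altGo, pyLoop1, pyLoop2]
  | cons s rest ih =>
    intro fb
    simp only [altGo, pyLoop1]
    cases h : techMap.get? (PySem.Str.lower s) with
    | some v => simp
    | none =>
      simp only []
      rw [ih]
      cases hl : pyLoop1 rest with
      | some v => simp
      | none =>
        cases fb with
        | some f => simp
        | none =>
          simp only [Option.isNone_none, if_true, pyLoop2]
          split_ifs <;> simp

-- ===== VERDICT (by name: the statement is the Claim_ definition above) =====
theorem identify_main_technology_py_spec : Claim_equal_identify_main_technology_py := by
  intro skills _
  unfold Spec_identify_main_technology_py identify_main_technology_py identify_main_technology_py_alt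
  rw [altGo_eq]
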